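-- pv_equiv track=rewrite | github.com/akisou/DreamSchool_QA | duplication_decline.py | duplication_decline
-- ===== SOURCE A (Python) =====
-- def duplication_decline(working_str):
--     working_str = list(working_str)
--     char2num = dict()
--
--     # 记录次数
--     for i in range(len(working_str)):
--         if working_str[i] in char2num.keys():
--             char2num[working_str[i]] += 1
--             working_str[i] = '-'
--         else:
--             char2num[working_str[i]] = 1
--
--     return ''.join(working_str)
-- ===== SOURCE B (Python) =====
-- def duplication_decline(working_str):
--     first = {}
--     for i, c in enumerate(working_str):
--         first.setdefault(c, i)
--     return ''.join(c if first[c] == i else '-' for i, c in enumerate(working_str))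
-- ===== Notes on version B (the rewrite author's own statement) =====
-- stated objective: simpler
-- what changed: Replaces A's single mutating scan (indexing into a char list, counting occurrences, overwriting cells in place) by two non-mutating passes: first build a char-to-first-index table with setdefault, then emit each character positionally, keeping it only where its index equals its first occurrence.
import Mathlib
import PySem

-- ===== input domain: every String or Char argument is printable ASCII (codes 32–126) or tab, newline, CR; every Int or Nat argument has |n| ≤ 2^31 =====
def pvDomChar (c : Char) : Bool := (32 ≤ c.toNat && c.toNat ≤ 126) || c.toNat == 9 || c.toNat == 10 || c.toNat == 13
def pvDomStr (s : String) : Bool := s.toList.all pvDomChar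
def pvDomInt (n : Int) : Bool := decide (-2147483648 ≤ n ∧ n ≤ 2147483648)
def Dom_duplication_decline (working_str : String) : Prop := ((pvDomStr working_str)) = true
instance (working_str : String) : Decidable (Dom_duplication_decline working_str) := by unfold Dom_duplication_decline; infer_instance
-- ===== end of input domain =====

-- B replaces A's single mutating indexed scan by two non-mutating passes (first-index table, then positional emit); objective: simpler.

-- ===== PORT A =====
-- loop body of A's 'for i in range(len(working_str))' (kept as a named helper)
def pvStepA (st : List Char × PySem.Dict Char Int) (i : Int) : List Char × PySem.Dict Char Int :=
  let c := PySem.List.pyGetD st.1 i ' '   -- working_str[i]; i is always in range, so the defaulted read is exact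
  if st.2.contains c then
    (PySem.List.pySetD st.1 i '-', st.2.modify c 0 (· + 1))   -- char2num[c] += 1; working_str[i] = '-' (in-range set, exact)
  else
    (st.1, st.2.insert c 1)

def duplication_decline (working_str : String) : String :=
  let ws := working_str.toList
  let st := (PySem.List.pyRange 0 (PySem.List.len ws) 1).foldl pvStepA (ws, PySem.Dict.empty)
  String.mk st.1

-- ===== PORT B =====
def duplication_decline_alt (working_str : String) : String :=
  let cs := working_str.toList
  let first := (PySem.List.enumerate cs 0).foldl
      (fun (d : PySem.Dict Char Int) p => d.setdefault p.2 p.1) PySem.Dict.empty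
  -- first[c]: every c comes from cs, so the key is present and the defaulted read is exact
  String.mk ((PySem.List.enumerate cs 0).map (fun p => if first.getD p.2 0 == p.1 then p.2 else '-'))

-- ===== PRECONDITION & SPEC =====
def Spec_duplication_decline (working_str : String) (out : String) : Prop := out = duplication_decline_alt working_str
instance (working_str : String) (out : String) : Decidable (Spec_duplication_decline working_str out) := by unfold Spec_duplication_decline; infer_instance

-- ===== CLAIM (what is proved, stated in full; the proofs are below) =====
def Claim_equal_duplication_decline : Prop := ∀ (working_str : String), Dom_duplication_decline working_str → Spec_duplication_decline working_str (duplication_decline working_str)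

-- ===== LEMMAS AND PROOFS =====

-- Reference behaviour: keep a char unseen in P, replace by '-' otherwise; seen set grows along the scan.
def pvMark (P : List Char) : List Char → List Char
  | [] => []
  | c :: r => (if c ∈ P then '-' else c) :: pvMark (c :: P) r

theorem pvMark_length (cs : List Char) : ∀ P : List Char, (pvMark P cs).length = cs.length := by
  induction cs with
  | nil => intro P; rfl
  | cons c r ih => intro P; simp [pvMark, ih]

theorem pvSet_append (pre : List Char) (c x : Char) (r : List Char) :
    (pre ++ c :: r).set pre.length x = pre ++ x :: r := by
  induction pre with
  | nil => rfl
  | cons p ps ih => simp [ih]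

theorem pvLoopA_eq (suf : List Char) : ∀ (pre : List Char) (d : PySem.Dict Char Int) (P : List Char),
    (∀ c, d.contains c = true ↔ c ∈ P) →
    ((PySem.List.pyRange (pre.length : Int) ((pre.length : Int) + (suf.length : Int)) 1).foldl
        pvStepA (pre ++ suf, d)).1 = pre ++ pvMark P suf := by
  induction suf with
  | nil =>
    intro pre d P hP
    rw [PySem.List.pyRange_one_eq_nil (by simp)]
    simp [pvMark]
  | cons c r ih =>
    intro pre d P hP
    have hlt : (pre.length : Int) < (pre.length : Int) + (((c :: r).length : Nat) : Int) := by
      simp only [List.length_cons, List.length_append, List.length_singleton, List.length_nil]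
      push_cast
      omega
    rw [PySem.List.pyRange_one_cons hlt, List.foldl_cons]
    have hget : PySem.List.pyGetD (pre ++ c :: r) (pre.length : Int) ' ' = c := by
      rw [PySem.List.pyGetD_natCast]
      simp [List.getD]
    by_cases hc : d.contains c = true
    · have hcP : c ∈ P := (hP c).1 hc
      have hstep : pvStepA (pre ++ c :: r, d) (pre.length : Int) =
          (pre ++ '-' :: r, d.modify c 0 (· + 1)) := by
        simp only [pvStepA, hget, hc, if_true]
        rw [PySem.List.pySetD_natCast, pvSet_append]
      rw [hstep]
      have hP' : ∀ x, (d.modify c 0 (· + 1)).contains x = true ↔ x ∈ (c :: P) := by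
        intro x
        rw [PySem.Dict.contains_modify]
        simp [hP x]
      have harr : (pre.length : Int) + (((c :: r).length : Nat) : Int) =
          (((pre ++ ['-']).length : Nat) : Int) + ((r.length : Nat) : Int) := by
        simp only [List.length_cons, List.length_append, List.length_singleton, List.length_nil]
        push_cast
        omega
      have hinit : pre ++ '-' :: r = (pre ++ ['-']) ++ r := by simp
      have hlen1 : (pre.length : Int) + 1 = (((pre ++ ['-']).length : Nat) : Int) := by
        simp
      rw [harr, hinit, hlen1, ih (pre ++ ['-']) _ (c :: P) hP']
      simp [pvMark, hcP]
    · have hcP : c ∉ P := fun h => hc ((hP c).2 h)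
      have hstep : pvStepA (pre ++ c :: r, d) (pre.length : Int) =
          (pre ++ c :: r, d.insert c 1) := by
        simp only [pvStepA, hget, hc, if_false, Bool.false_eq_true]
      rw [hstep]
      have hP' : ∀ x, (d.insert c 1).contains x = true ↔ x ∈ (c :: P) := by
        intro x
        rw [PySem.Dict.contains_insert]
        simp [hP x]
      have harr : (pre.length : Int) + (((c :: r).length : Nat) : Int) =
          (((pre ++ [c]).length : Nat) : Int) + ((r.length : Nat) : Int) := by
        simp only [List.length_cons, List.length_append, List.length_singleton, List.length_nil]
        push_cast
        omega
      have hinit : pre ++ c :: r = (pre ++ [c]) ++ r := by simp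
      have hlen1 : (pre.length : Int) + 1 = (((pre ++ [c]).length : Nat) : Int) := by
        simp
      rw [harr, hinit, hlen1, ih (pre ++ [c]) _ (c :: P) hP']
      simp [pvMark, hcP]

theorem pvFirstFold_get? (cs : List Char) : ∀ (s : Int) (d : PySem.Dict Char Int) (c : Char),
    ((PySem.List.enumerate cs s).foldl
        (fun (d : PySem.Dict Char Int) p => d.setdefault p.2 p.1) d).get? c
      = (d.get? c).or ((PySem.List.index? cs c).map (fun k => s + (k : Int))) := by
  induction cs with
  | nil =>
    intro s d c
    simp [PySem.List.enumerate, PySem.List.index?]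
  | cons x r ih =>
    intro s d c
    rw [PySem.List.enumerate_cons, List.foldl_cons, ih]
    by_cases hcx : c = x
    · subst hcx
      rw [PySem.List.index?_cons_self, PySem.Dict.get?_setdefault_self]
      cases hd : d.get? c with
      | none => simp
      | some v => simp
    · rw [PySem.Dict.get?_setdefault_of_ne _ _ hcx,
          PySem.List.index?_cons_of_ne r (fun h => hcx h.symm)]
      cases hi : PySem.List.index? r c with
      | none => simp
      | some k =>
        cases hd : d.get? c with
        | none =>
          simp [Option.or]
          try omega
        | some v => simp [Option.or]

theorem pvIdxFirst (cs : List Char) : ∀ (k : Nat) (h : k < cs.length),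
    (PySem.List.index? cs cs[k] = some k) ↔ cs[k] ∉ cs.take k := by
  induction cs with
  | nil => intro k h; simp at h
  | cons x r ih =>
    intro k h
    cases k with
    | zero =>
      simp only [List.getElem_cons_zero, List.take_zero, List.not_mem_nil,
        not_false_eq_true, iff_true]
      rw [PySem.List.index?_cons_self]
    | succ k =>
      have hk : k < r.length := by simpa using h
      simp only [List.getElem_cons_succ, List.take_succ_cons, List.mem_cons]
      by_cases hx : r[k] = x
      · rw [hx, PySem.List.index?_cons_self]
        simp
      · rw [PySem.List.index?_cons_of_ne r (fun h => hx h.symm)]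
        have : (Option.map (fun x => x + 1) (PySem.List.index? r r[k]) = some (k + 1))
            ↔ PySem.List.index? r r[k] = some k := by
          cases hi : PySem.List.index? r r[k] with
          | none => simp
          | some j => simp
        rw [this, ih k hk]
        simp [hx]

theorem pvMark_getElem (cs : List Char) : ∀ (P : List Char) (k : Nat) (h : k < cs.length),
    (pvMark P cs)[k]'(by rw [pvMark_length]; exact h) =
      if cs[k] ∈ P ∨ cs[k] ∈ cs.take k then '-' else cs[k] := by
  induction cs with
  | nil => intro P k h; simp at h
  | cons c r ih =>
    intro P k h
    cases k with
    | zero => simp [pvMark]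
    | succ k =>
      have hk : k < r.length := by simpa using h
      have hrec := ih (c :: P) k hk
      simp only [pvMark, List.getElem_cons_succ, List.take_succ_cons, List.mem_cons] at hrec ⊢
      rw [hrec]
      by_cases h1 : r[k] ∈ P <;> by_cases h2 : r[k] = c <;> by_cases h3 : r[k] ∈ r.take k <;>
        simp [h1, h2, h3]

theorem pvAlt_getElem (cs : List Char) (k : Nat) (h : k < cs.length) :
    (((PySem.List.enumerate cs 0).map
        (fun p => if ((PySem.List.enumerate cs 0).foldl
            (fun (d : PySem.Dict Char Int) p => d.setdefault p.2 p.1)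
            PySem.Dict.empty).getD p.2 0 == p.1 then p.2 else '-'))[k]'
        (by simp [PySem.List.length_enumerate]; exact h))
      = if cs[k] ∈ cs.take k then '-' else cs[k] := by
  have hk' : k < (PySem.List.enumerate cs 0).length := by
    rw [PySem.List.length_enumerate]; exact h
  rw [List.getElem_map, PySem.List.getElem_enumerate cs 0 k hk']
  have hget := pvFirstFold_get? cs 0 PySem.Dict.empty cs[k]
  rw [PySem.Dict.get?_empty] at hget
  have hmem : cs[k] ∈ cs := List.getElem_mem h
  obtain ⟨j, hj⟩ := Option.isSome_iff_exists.1
    ((PySem.List.index?_isSome_iff cs cs[k]).2 hmem)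
  rw [hj] at hget
  simp only [Option.none_or] at hget
  have hgetD : ((PySem.List.enumerate cs 0).foldl
      (fun (d : PySem.Dict Char Int) p => d.setdefault p.2 p.1)
      PySem.Dict.empty).getD cs[k] 0 = 0 + (j : Int) := by
    rw [PySem.Dict.getD_eq_get?_getD, hget]; rfl
  rw [hgetD]
  by_cases h3 : cs[k] ∈ cs.take k
  · have hne : j ≠ k := by
      intro hjk
      rw [hjk] at hj
      exact ((pvIdxFirst cs k h).1 hj) h3
    simp only [h3, if_true]
    simp only [beq_iff_eq, zero_add, Nat.cast_inj]
    exact if_neg hne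
  · have hj' : PySem.List.index? cs cs[k] = some k := (pvIdxFirst cs k h).2 h3
    have hjk : j = k := by rw [hj] at hj'; exact Option.some.inj hj'
    subst hjk
    simp [h3]

-- ===== VERDICT (by name: the statement is the Claim_ definition above) =====
theorem duplication_decline_spec : Claim_equal_duplication_decline := by
  unfold Claim_equal_duplication_decline
  intro s _
  unfold Spec_duplication_decline duplication_decline duplication_decline_alt
  have hA : ((PySem.List.pyRange 0 (PySem.List.len s.toList) 1).foldl pvStepA
      (s.toList, PySem.Dict.empty)).1 = pvMark [] s.toList := by
    have hres := pvLoopA_eq s.toList [] PySem.Dict.empty []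
      (by intro c; simp)
    simpa using hres
  simp only [hA]
  congr 1
  apply List.ext_getElem
  · simp [pvMark_length, PySem.List.length_enumerate]
  · intro k h1 h2
    rw [pvAlt_getElem s.toList k (by simpa [PySem.List.length_enumerate] using h2)]
    have := pvMark_getElem s.toList [] k (by simpa [pvMark_length] using h1)
    simp only [List.not_mem_nil, false_or] at this
    exact this
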